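-- pv_equiv track=rewrite | github.com/AHTARazzak/rosalind_bioinf | stronghold/TRIE/TRIE.py | get_most_overlap
-- ===== SOURCE A (Python) =====
-- def get_most_overlap(s, L):
--     most_string, most_overlap = "", ""
--     for l in L:
--         overlap = ""
--         for i in range(len(s)):
--             if l[:len(s)-i] == s[:len(s)-i]:
--                 overlap = l[:len(s)-i]
--                 break
--         if len(overlap) > len(most_overlap):
--             most_string = l
--             most_overlap = overlap
--     return most_string, most_overlap
-- ===== SOURCE B (Python) =====
-- def get_most_overlap(s, L):
--     for k in range(len(s), 0, -1):
--         p = s[:k]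
--         for l in L:
--             if l.startswith(p):
--                 return l, p
--     return "", ""
-- ===== Notes on version B (the rewrite author's own statement) =====
-- stated objective: faster
-- what changed: Inverted the loop nesting: B tries prefix lengths of s from longest to shortest and returns on the first list element starting with that prefix, replacing A's per-element longest-overlap computation and max-tracking accumulator.
import Mathlib
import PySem

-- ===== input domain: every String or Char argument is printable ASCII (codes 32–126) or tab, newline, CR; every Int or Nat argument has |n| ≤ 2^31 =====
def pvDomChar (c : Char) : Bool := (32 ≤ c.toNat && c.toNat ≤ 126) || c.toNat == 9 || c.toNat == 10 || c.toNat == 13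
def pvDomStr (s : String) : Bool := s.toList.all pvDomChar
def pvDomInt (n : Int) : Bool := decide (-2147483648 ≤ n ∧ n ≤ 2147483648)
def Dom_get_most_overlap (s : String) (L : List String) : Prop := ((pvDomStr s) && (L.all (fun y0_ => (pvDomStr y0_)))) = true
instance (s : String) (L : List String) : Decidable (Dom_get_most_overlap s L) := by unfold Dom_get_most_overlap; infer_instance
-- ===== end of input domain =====

-- B inverts the loop nesting: prefix lengths of s longest-first with early return, instead of A's per-element overlap plus max-tracking accumulator; same results, proved equal.


-- ===== PORT A =====
-- inner 'for i in range(len(s)): if l[:len(s)-i] == s[:len(s)-i]: overlap = …; break'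
def pvAInner (s l : String) : List Int → String
  | [] => ""
  | i :: rest =>
      if PySem.Str.slice l none (some (PySem.Str.len s - i)) = PySem.Str.slice s none (some (PySem.Str.len s - i))
      then PySem.Str.slice l none (some (PySem.Str.len s - i))
      else pvAInner s l rest

def get_most_overlap (s : String) (L : List String) : String × String :=
  L.foldl (fun acc l =>
      let overlap := pvAInner s l (PySem.List.pyRange 0 (PySem.Str.len s) 1)
      if PySem.Str.len overlap > PySem.Str.len acc.2 then (l, overlap) else acc)
    ("", "")

-- ===== PORT B =====
-- outer 'for k in range(len(s), 0, -1)' with 'return l, p' on the first l that startswith p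
def pvBLoop (s : String) (L : List String) : List Int → String × String
  | [] => ("", "")
  | k :: rest =>
      let p := PySem.Str.slice s none (some k)
      match L.find? (fun l => PySem.Str.startswith l p) with
      | some l => (l, p)
      | none => pvBLoop s L rest

def get_most_overlap_alt (s : String) (L : List String) : String × String :=
  pvBLoop s L (PySem.List.pyRange (PySem.Str.len s) 0 (-1))

-- ===== PRECONDITION & SPEC =====
def Spec_get_most_overlap (s : String) (L : List String) (out : String × String) : Prop := out = get_most_overlap_alt s L
instance (s : String) (L : List String) (out : String × String) : Decidable (Spec_get_most_overlap s L out) := by unfold Spec_get_most_overlap; infer_instance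

-- ===== CLAIM (what is proved, stated in full; the proofs are below) =====
def Claim_equal_get_most_overlap : Prop := ∀ (s : String) (L : List String), Dom_get_most_overlap s L → Spec_get_most_overlap s L (get_most_overlap s L)

-- ===== LEMMAS AND PROOFS =====

-- length of the longest common prefix of two char lists
def pvLcp : List Char → List Char → Nat
  | a :: as, b :: bs => if a = b then pvLcp as bs + 1 else 0
  | _, _ => 0

-- max of pvLcp s.toList l.toList over l ∈ L
def pvM (cs : List Char) (L : List String) : Nat :=
  L.foldr (fun l acc => max (pvLcp cs l.toList) acc) 0

theorem pvLcp_le (cs cl : List Char) : pvLcp cs cl ≤ cs.length := by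
  induction cs generalizing cl with
  | nil => cases cl <;> simp [pvLcp]
  | cons a as ih =>
    cases cl with
    | nil => simp [pvLcp]
    | cons b bs =>
      simp only [pvLcp]
      split
      · simpa using ih bs
      · simp

theorem pvTake_iff (cs cl : List Char) (k : Nat) (hk : k ≤ cs.length) :
    cl.take k = cs.take k ↔ k ≤ pvLcp cs cl := by
  induction cs generalizing cl k with
  | nil =>
    have : k = 0 := Nat.le_zero.mp (by simpa using hk)
    subst this; simp
  | cons a as ih =>
    cases k with
    | zero => simp
    | succ k =>
      cases cl with
      | nil =>
        simp only [List.take_nil, pvLcp]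
        constructor
        · intro h; exact absurd h.symm (by simp)
        · omega
      | cons b bs =>
        simp only [List.take_succ_cons, List.cons_eq_cons, pvLcp]
        by_cases hab : a = b
        · subst hab
          rw [if_pos rfl]
          simp only [true_and]
          rw [ih bs k (by simpa using hk)]
          omega
        · simp [Ne.symm hab, hab]

theorem pvM_le (cs : List Char) (L : List String) : pvM cs L ≤ cs.length := by
  induction L with
  | nil => simp [pvM]
  | cons l t ih => simp only [pvM, List.foldr_cons] at *; exact max_le (pvLcp_le _ _) ih

theorem pvLcp_le_pvM (cs : List Char) (L : List String) (l : String) (hl : l ∈ L) :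
    pvLcp cs l.toList ≤ pvM cs L := by
  induction L with
  | nil => cases hl
  | cons x t ih =>
    simp only [pvM, List.foldr_cons]
    rcases List.mem_cons.mp hl with h | h
    · subst h; exact le_max_left _ _
    · exact le_trans (ih h) (le_max_right _ _)

theorem pvM_cons (cs : List Char) (l : String) (t : List String) :
    pvM cs (l :: t) = max (pvLcp cs l.toList) (pvM cs t) := rfl

-- first element of L whose lcp with s attains the maximum
def pvP (cs : List Char) (L : List String) : String → Bool :=
  fun l => decide (pvM cs L ≤ pvLcp cs l.toList)

theorem pvM_attained (cs : List Char) : ∀ (L : List String), pvM cs L ≠ 0 →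
    ∃ l ∈ L, pvM cs L ≤ pvLcp cs l.toList := by
  intro L
  induction L with
  | nil => intro h; simp [pvM] at h
  | cons x t ih =>
    intro h
    rw [pvM_cons] at h ⊢
    by_cases hx : pvM cs t ≤ pvLcp cs x.toList
    · exact ⟨x, List.mem_cons_self, by omega⟩
    · obtain ⟨l, hl, hpl⟩ := ih (by omega)
      exact ⟨l, List.mem_cons_of_mem _ hl, by omega⟩

-- A's inner loop over the remaining indices computes the common prefix, capped at d
theorem pvAInner_eq (s l : String) : ∀ (d : Nat), d ≤ s.toList.length →
    pvAInner s l (PySem.List.pyRange ((s.toList.length - d : Nat) : Int) (PySem.Str.len s) 1) =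
      String.ofList (s.toList.take (min d (pvLcp s.toList l.toList))) := by
  intro d
  induction d with
  | zero =>
    intro _
    rw [PySem.Str.len_eq, PySem.List.pyRange_one_eq_nil (by simp)]
    simp [pvAInner]
  | succ d ih =>
    intro hd
    have hlt : ((s.toList.length - (d+1) : Nat) : Int) < PySem.Str.len s := by
      rw [PySem.Str.len_eq]; omega
    rw [PySem.List.pyRange_one_cons hlt]
    simp only [pvAInner]
    have hslice : PySem.Str.len s - ((s.toList.length - (d+1) : Nat) : Int) = ((d+1 : Nat) : Int) := by
      rw [PySem.Str.len_eq]; omega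
    rw [hslice]
    have hcond : (PySem.Str.slice l none (some ((d+1:Nat):Int)) = PySem.Str.slice s none (some ((d+1:Nat):Int)))
        ↔ (l.toList.take (d+1) = s.toList.take (d+1)) := by
      rw [String.ext_iff, PySem.Str.toList_slice, PySem.Str.toList_slice,
        PySem.Chars.slice_eq_listSlice, PySem.Chars.slice_eq_listSlice,
        PySem.List.slice_to_natCast, PySem.List.slice_to_natCast]
    split_ifs with h
    · have htake := hcond.mp h
      have hle : d + 1 ≤ pvLcp s.toList l.toList := (pvTake_iff _ _ _ hd).mp htake
      have hmin : min (d+1) (pvLcp s.toList l.toList) = d + 1 := by omega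
      rw [hmin]
      calc PySem.Str.slice l none (some ((d+1:Nat):Int))
          = String.ofList (PySem.Str.slice l none (some ((d+1:Nat):Int))).toList := String.ofList_toList.symm
        _ = String.ofList (s.toList.take (d+1)) := by
            rw [PySem.Str.toList_slice, PySem.Chars.slice_eq_listSlice, PySem.List.slice_to_natCast, htake]
    · have hlt' : pvLcp s.toList l.toList < d + 1 := by
        by_contra hc
        exact h (hcond.mpr ((pvTake_iff _ _ _ hd).mpr (by omega)))
      have harg : ((s.toList.length - (d+1) : Nat) : Int) + 1 = ((s.toList.length - d : Nat) : Int) := by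
        omega
      rw [harg, ih (by omega)]
      have hmm : min d (pvLcp s.toList l.toList) = min (d+1) (pvLcp s.toList l.toList) := by omega
      rw [hmm]

theorem pvAInner_full (s l : String) :
    pvAInner s l (PySem.List.pyRange 0 (PySem.Str.len s) 1) =
      String.ofList (s.toList.take (pvLcp s.toList l.toList)) := by
  have h := pvAInner_eq s l s.toList.length le_rfl
  have h0 : ((s.toList.length - s.toList.length : Nat) : Int) = 0 := by omega
  rw [h0] at h
  rw [h]
  have hle := pvLcp_le s.toList l.toList
  have hmin : min s.toList.length (pvLcp s.toList l.toList) = pvLcp s.toList l.toList := by omega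
  rw [hmin]

theorem pvLen_ofList_take (s : String) (K : Nat) (hK : K ≤ s.toList.length) :
    PySem.Str.len (String.ofList (s.toList.take K)) = (K : Int) := by
  rw [PySem.Str.len_eq, String.toList_ofList, List.length_take]
  congr 1
  omega

-- A's fold with a general accumulator (the loop body written in applied form,
-- definitionally equal to the port's `let`-form)
theorem pvAFold (s : String) (L : List String) : ∀ (ms : String) (K : Nat), K ≤ s.toList.length →
    L.foldl (fun (acc : String × String) l =>
        if PySem.Str.len (pvAInner s l (PySem.List.pyRange 0 (PySem.Str.len s) 1)) > PySem.Str.len acc.2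
        then (l, pvAInner s l (PySem.List.pyRange 0 (PySem.Str.len s) 1)) else acc)
      (ms, String.ofList (s.toList.take K)) =
    (if pvM s.toList L ≤ K then (ms, String.ofList (s.toList.take K))
     else ((L.find? (pvP s.toList L)).getD "", String.ofList (s.toList.take (pvM s.toList L)))) := by
  induction L with
  | nil => intro ms K hK; simp [pvM]
  | cons l t ih =>
    intro ms K hK
    have hml : pvLcp s.toList l.toList ≤ s.toList.length := pvLcp_le _ _
    have hmt : pvM s.toList t ≤ s.toList.length := pvM_le _ _
    rw [List.foldl_cons]
    have hstep : (if PySem.Str.len (pvAInner s l (PySem.List.pyRange 0 (PySem.Str.len s) 1))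
          > PySem.Str.len ((ms, String.ofList (s.toList.take K)) : String × String).2
        then (l, pvAInner s l (PySem.List.pyRange 0 (PySem.Str.len s) 1))
        else (ms, String.ofList (s.toList.take K)))
        = (if K < pvLcp s.toList l.toList
           then (l, String.ofList (s.toList.take (pvLcp s.toList l.toList)))
           else (ms, String.ofList (s.toList.take K))) := by
      simp only [pvAInner_full, pvLen_ofList_take s K hK, pvLen_ofList_take s _ hml]
      by_cases hc : K < pvLcp s.toList l.toList
      · rw [if_pos (by exact_mod_cast hc), if_pos hc]
      · rw [if_neg (by exact_mod_cast hc), if_neg hc]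
    rw [hstep]
    by_cases hc : K < pvLcp s.toList l.toList
    · rw [if_pos hc, ih l (pvLcp s.toList l.toList) hml, pvM_cons]
      by_cases hts : pvM s.toList t ≤ pvLcp s.toList l.toList
      · rw [if_pos hts]
        have hmax : max (pvLcp s.toList l.toList) (pvM s.toList t) = pvLcp s.toList l.toList := by omega
        rw [if_neg (by omega), hmax]
        have hPl : pvP s.toList (l :: t) l = true := by
          simp only [pvP, pvM_cons, hmax, decide_eq_true_eq]
          omega
        rw [List.find?_cons_of_pos hPl, Option.getD_some]
      · rw [if_neg hts]
        have hmax : max (pvLcp s.toList l.toList) (pvM s.toList t) = pvM s.toList t := by omega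
        rw [if_neg (by omega), hmax]
        have hPl : ¬ pvP s.toList (l :: t) l = true := by
          simp only [pvP, pvM_cons, hmax, decide_eq_true_eq]
          omega
        rw [List.find?_cons_of_neg hPl]
        have hpeq : pvP s.toList (l :: t) = pvP s.toList t := by
          funext x
          simp only [pvP, pvM_cons, hmax]
        rw [hpeq]
    · rw [if_neg hc, ih ms K hK, pvM_cons]
      by_cases htK : pvM s.toList t ≤ K
      · rw [if_pos htK, if_pos (by omega)]
      · rw [if_neg htK, if_neg (by omega)]
        have hmax : max (pvLcp s.toList l.toList) (pvM s.toList t) = pvM s.toList t := by omega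
        have hPl : ¬ pvP s.toList (l :: t) l = true := by
          simp only [pvP, pvM_cons, hmax, decide_eq_true_eq]
          omega
        rw [hmax, List.find?_cons_of_neg hPl]
        have hpeq : pvP s.toList (l :: t) = pvP s.toList t := by
          funext x
          simp only [pvP, pvM_cons, hmax]
        rw [hpeq]

-- B's countdown loop
theorem pvBLoop_eq (s : String) (L : List String) : ∀ (k : Nat), k ≤ s.toList.length →
    pvM s.toList L ≤ k →
    pvBLoop s L (PySem.List.pyRange (k : Int) 0 (-1)) =
      (if pvM s.toList L = 0 then ("", "")
       else ((L.find? (pvP s.toList L)).getD "", String.ofList (s.toList.take (pvM s.toList L)))) := by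
  intro k
  induction k with
  | zero =>
    intro _ hM
    rw [PySem.List.pyRange_neg_one_eq_nil (by simp)]
    simp only [pvBLoop]
    rw [if_pos (by omega)]
  | succ k ih =>
    intro hk hM
    rw [show ((k+1 : Nat) : Int) = ((k:Int)+1) by push_cast; ring,
      PySem.List.pyRange_neg_one_cons (by omega),
      show ((k:Int)+1-1 : Int) = (k : Int) by ring]
    simp only [pvBLoop]
    have hpred : ∀ x : String,
        PySem.Str.startswith x (PySem.Str.slice s none (some ((k:Int)+1))) = true
          ↔ k + 1 ≤ pvLcp s.toList x.toList := by
      intro x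
      rw [PySem.Str.startswith_eq, PySem.Chars.startswith_iff]
      rw [PySem.Str.toList_slice, PySem.Chars.slice_eq_listSlice]
      rw [show ((k:Int)+1) = ((k+1 : Nat) : Int) by push_cast; ring, PySem.List.slice_to_natCast]
      rw [List.prefix_iff_eq_take, List.length_take]
      have hlen : min (k+1) s.toList.length = k + 1 := by omega
      rw [hlen]
      constructor
      · intro h; exact (pvTake_iff s.toList x.toList (k+1) hk).mp h.symm
      · intro h; exact ((pvTake_iff s.toList x.toList (k+1) hk).mpr h).symm
    by_cases hMk : pvM s.toList L ≤ k
    · have hfind : L.find? (fun l => PySem.Str.startswith l (PySem.Str.slice s none (some ((k:Int)+1)))) = none := by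
        rw [List.find?_eq_none]
        intro x hx hcontra
        have h1 := (hpred x).mp hcontra
        have h2 := pvLcp_le_pvM s.toList L x hx
        omega
      rw [hfind]
      exact ih (by omega) hMk
    · have hMeq : pvM s.toList L = k + 1 := by omega
      have hpeq : (fun l => PySem.Str.startswith l (PySem.Str.slice s none (some ((k:Int)+1)))) = pvP s.toList L := by
        funext x
        rw [Bool.eq_iff_iff, hpred x]
        simp only [pvP, decide_eq_true_eq, hMeq]
      rw [hpeq]
      obtain ⟨l0, hl0, hpl0⟩ := pvM_attained s.toList L (by omega)
      have hsome : (L.find? (pvP s.toList L)).isSome := by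
        rw [List.find?_isSome]
        exact ⟨l0, hl0, by simp [pvP, hpl0]⟩
      obtain ⟨lw, hlw⟩ := Option.isSome_iff_exists.mp hsome
      rw [hlw]
      simp only [Option.getD_some]
      rw [if_neg (by omega)]
      have hval : PySem.Str.slice s none (some ((k:Int)+1)) = String.ofList (s.toList.take (pvM s.toList L)) := by
        calc PySem.Str.slice s none (some ((k:Int)+1))
            = String.ofList (PySem.Str.slice s none (some ((k:Int)+1))).toList := String.ofList_toList.symm
          _ = String.ofList (s.toList.take (pvM s.toList L)) := by
              rw [PySem.Str.toList_slice, PySem.Chars.slice_eq_listSlice,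
                show ((k:Int)+1) = ((k+1 : Nat) : Int) by push_cast; ring,
                PySem.List.slice_to_natCast, hMeq]
      rw [hval]

-- ===== VERDICT (by name: the statement is the Claim_ definition above) =====
theorem get_most_overlap_spec : Claim_equal_get_most_overlap := by
  intro s L _
  unfold Spec_get_most_overlap
  have hA : get_most_overlap s L =
      (if pvM s.toList L ≤ 0 then (("" : String), String.ofList (s.toList.take 0))
       else ((L.find? (pvP s.toList L)).getD "", String.ofList (s.toList.take (pvM s.toList L)))) :=
    pvAFold s L "" 0 (Nat.zero_le _)
  have hB : get_most_overlap_alt s L =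
      (if pvM s.toList L = 0 then (("" : String), ("" : String))
       else ((L.find? (pvP s.toList L)).getD "", String.ofList (s.toList.take (pvM s.toList L)))) :=
    pvBLoop_eq s L s.toList.length le_rfl (pvM_le _ _)
  rw [hA, hB]
  by_cases hM : pvM s.toList L = 0
  · rw [if_pos (by omega), if_pos hM]
    simp
  · rw [if_neg (by omega), if_neg hM]
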